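-- pv_equiv track=rewrite | github.com/Delacrua/AllignedCodeinternship | ticket.py | get_nearest_lucky_ticket
-- ===== SOURCE A (Python) =====
-- def get_nearest_lucky_ticket(ticket_number: int) -> int:
--     """
--     The function returns the nearest lucky ticket number to the given ticket number (according to the task number is
--     lucky if sum of its first three digits is equal to sum of its last three digits)
--     :param ticket_number: given ticket number
--     :return: nearest lucky ticket number
--     """
--     def _is_lucky(number: int) -> bool:
--         """
--         Helper function to find if a six-digit number is lucky in terms of the task
--         :param number: given number
--         :return: True if number is lucky, else False
--         """
--         digits = [int(digit) for digit in str(number)]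
--         return sum(digits[:3]) == sum(digits[3:])
--
--     if _is_lucky(ticket_number):
--         return ticket_number
--     elif ticket_number == 100_000:  # set this as a unique case as a lower number will be 5-digit
--         return 100_001
--     else:
--         higher_number = ticket_number + 1
--         while not _is_lucky(higher_number):
--             higher_number += 1
--         lower_number = ticket_number - 1
--         while not _is_lucky(lower_number):
--             lower_number -= 1
--
--         return lower_number if ticket_number - lower_number <= higher_number - ticket_number else higher_number
-- ===== SOURCE B (Python) =====
-- def get_nearest_lucky_ticket(ticket_number: int) -> int:
--     """Nearest lucky ticket via a single expanding-radius scan (lower candidate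
--     tested first at each radius, so ties resolve to the lower number)."""
--     def _is_lucky(number: int) -> bool:
--         digits = [int(digit) for digit in str(number)]
--         return sum(digits[:3]) == sum(digits[3:])
--
--     if _is_lucky(ticket_number):
--         return ticket_number
--     d = 1
--     while True:
--         if _is_lucky(ticket_number - d):
--             return ticket_number - d
--         if _is_lucky(ticket_number + d):
--             return ticket_number + d
--         d += 1
-- ===== Notes on version B (the rewrite author's own statement) =====
-- stated objective: simpler
-- what changed: Replaces A's two separate upward/downward searches plus a distance comparison and the special-cased 100000 guard with a single expanding-radius loop that tests ticket-d before ticket+d at each radius d=1,2,..., returning the first lucky hit (ties therefore resolve to the lower number, as in A).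
import Mathlib
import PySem

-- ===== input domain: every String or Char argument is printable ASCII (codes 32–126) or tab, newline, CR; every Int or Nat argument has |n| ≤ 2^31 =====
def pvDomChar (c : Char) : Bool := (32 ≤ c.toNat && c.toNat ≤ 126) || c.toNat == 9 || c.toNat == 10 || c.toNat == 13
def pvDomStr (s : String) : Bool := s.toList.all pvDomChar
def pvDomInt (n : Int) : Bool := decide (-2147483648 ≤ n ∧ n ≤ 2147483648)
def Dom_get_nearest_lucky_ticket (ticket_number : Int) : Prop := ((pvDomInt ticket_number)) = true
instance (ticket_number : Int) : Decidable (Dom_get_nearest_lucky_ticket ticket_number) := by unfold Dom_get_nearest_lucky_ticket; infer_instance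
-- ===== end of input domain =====

-- B replaces A's two separate up/down searches, final distance comparison and 100000 guard
-- with one expanding-radius loop (lower candidate tested first, so ties go low): simpler.

-- shared helper _is_lucky (identical inner function in both Pythons).
-- int(digit): PySem.Int.ofStr? on the one-char string; the .getD 0 default is never
-- used inside Pre_ (it would only fire on the '-' of a negative number, where Python
-- raises ValueError and Pre_ excludes the input).
def pvIsLucky (number : Int) : Bool :=
  let digits := (PySem.Int.toStr number).toList.map
    (fun c => (PySem.Int.ofStr? (String.ofList [c])).getD 0)
  -- digits[:3] / digits[3:] with nonnegative bounds = take 3 / drop 3 (exact)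
  (digits.take 3).sum == (digits.drop 3).sum

-- fuel making the unbounded Python 'while' loops structural; large enough that it is
-- never exhausted inside Pre_ (proved below), so it only guards totality.
def pvFuel : Nat := 10000000002

-- ===== PORT A =====
-- while not _is_lucky(higher_number): higher_number += 1
def pvSearchUp : Int → Nat → Int
  | h, 0 => h
  | h, fuel + 1 => if pvIsLucky h then h else pvSearchUp (h + 1) fuel

-- while not _is_lucky(lower_number): lower_number -= 1
def pvSearchDown : Int → Nat → Int
  | h, 0 => h
  | h, fuel + 1 => if pvIsLucky h then h else pvSearchDown (h - 1) fuel

def get_nearest_lucky_ticket (ticket_number : Int) : Int :=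
  if pvIsLucky ticket_number then ticket_number
  else if ticket_number == 100000 then 100001
  else
    let higher_number := pvSearchUp (ticket_number + 1) pvFuel
    let lower_number := pvSearchDown (ticket_number - 1) pvFuel
    if ticket_number - lower_number ≤ higher_number - ticket_number then lower_number
    else higher_number

-- ===== PORT B =====
-- the expanding-radius 'while True' loop of Source B
def pvScan (t : Int) : Int → Nat → Int
  | _, 0 => t
  | d, fuel + 1 =>
    if pvIsLucky (t - d) then t - d
    else if pvIsLucky (t + d) then t + d
    else pvScan t (d + 1) fuel

def get_nearest_lucky_ticket_alt (ticket_number : Int) : Int :=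
  if pvIsLucky ticket_number then ticket_number
  else pvScan ticket_number 1 pvFuel

-- ===== PRECONDITION & SPEC =====
-- Pre_ excludes negative ticket numbers, on which both Pythons raise ValueError
-- (int('-') inside _is_lucky); A returns on every ticket_number ≥ 0.
def Pre_get_nearest_lucky_ticket (ticket_number : Int) : Prop := 0 ≤ ticket_number
instance (ticket_number : Int) : Decidable (Pre_get_nearest_lucky_ticket ticket_number) := by unfold Pre_get_nearest_lucky_ticket; infer_instance

def pvWitness_get_nearest_lucky_ticket : Int := 123456

def Spec_get_nearest_lucky_ticket (ticket_number : Int) (out : Int) : Prop := out = get_nearest_lucky_ticket_alt ticket_number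
instance (ticket_number : Int) (out : Int) : Decidable (Spec_get_nearest_lucky_ticket ticket_number out) := by unfold Spec_get_nearest_lucky_ticket; infer_instance

-- ===== CLAIM (what is proved, stated in full; the proofs are below) =====
def Claim_equal_get_nearest_lucky_ticket : Prop := ∀ (ticket_number : Int), Dom_get_nearest_lucky_ticket ticket_number → Pre_get_nearest_lucky_ticket ticket_number → Spec_get_nearest_lucky_ticket ticket_number (get_nearest_lucky_ticket ticket_number)

-- ===== LEMMAS AND PROOFS =====

theorem pvLucky_zero : pvIsLucky 0 = true := by decide

theorem pvLucky_big : pvIsLucky 10000000001 = true := by decide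

theorem pvLucky_100001 : pvIsLucky 100001 = true := by decide

theorem pvNotLucky_99999 : pvIsLucky 99999 = false := by decide

-- pvSearchUp finds the least lucky number ≥ h, given fuel reaches some lucky m ≥ h
theorem pvSearchUp_spec : ∀ (fuel : Nat) (h m : Int), pvIsLucky m = true → h ≤ m →
    (m - h).toNat < fuel →
    pvIsLucky (pvSearchUp h fuel) = true ∧ h ≤ pvSearchUp h fuel ∧ pvSearchUp h fuel ≤ m ∧
      ∀ x, h ≤ x → x < pvSearchUp h fuel → pvIsLucky x = false := by
  intro fuel
  induction fuel with
  | zero => intro h m _ _ hf; omega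
  | succ fuel ih =>
    intro h m hm hhm hf
    by_cases hl : pvIsLucky h = true
    · refine ⟨by simp [pvSearchUp, hl], by simp [pvSearchUp, hl], by simp [pvSearchUp, hl]; omega,
        fun x hx1 hx2 => ?_⟩
      simp [pvSearchUp, hl] at hx2; omega
    · have hne : h ≠ m := by rintro rfl; exact hl hm
      have := ih (h + 1) m hm (by omega) (by omega)
      refine ⟨by simpa [pvSearchUp, hl] using this.1,
        by have := this.2.1; simp [pvSearchUp, hl]; omega,
        by simpa [pvSearchUp, hl] using this.2.2.1, fun x hx1 hx2 => ?_⟩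
      by_cases hxh : x = h
      · subst hxh; simpa using hl
      · exact this.2.2.2 x (by omega) (by simpa [pvSearchUp, hl] using hx2)

theorem pvSearchDown_spec : ∀ (fuel : Nat) (h m : Int), pvIsLucky m = true → m ≤ h →
    (h - m).toNat < fuel →
    pvIsLucky (pvSearchDown h fuel) = true ∧ pvSearchDown h fuel ≤ h ∧ m ≤ pvSearchDown h fuel ∧
      ∀ x, x ≤ h → pvSearchDown h fuel < x → pvIsLucky x = false := by
  intro fuel
  induction fuel with
  | zero => intro h m _ _ hf; omega
  | succ fuel ih =>
    intro h m hm hhm hf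
    by_cases hl : pvIsLucky h = true
    · refine ⟨by simp [pvSearchDown, hl], by simp [pvSearchDown, hl], by simp [pvSearchDown, hl]; omega,
        fun x hx1 hx2 => ?_⟩
      simp [pvSearchDown, hl] at hx2; omega
    · have hne : h ≠ m := by rintro rfl; exact hl hm
      have := ih (h - 1) m hm (by omega) (by omega)
      refine ⟨by simpa [pvSearchDown, hl] using this.1,
        by have := this.2.1; simp [pvSearchDown, hl]; omega,
        by simpa [pvSearchDown, hl] using this.2.2.1, fun x hx1 hx2 => ?_⟩
      by_cases hxh : x = h
      · subst hxh; simpa using hl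
      · exact this.2.2.2 x (by omega) (by simpa [pvSearchDown, hl] using hx2)

-- the expanding-radius scan returns the nearer of the two first lucky hits, ties low
theorem pvScan_spec : ∀ (fuel : Nat) (t d dl dh : Int),
    1 ≤ d → d ≤ dl → d ≤ dh →
    pvIsLucky (t - dl) = true → pvIsLucky (t + dh) = true →
    (∀ e, d ≤ e → e < dl → pvIsLucky (t - e) = false) →
    (∀ e, d ≤ e → e < dh → pvIsLucky (t + e) = false) →
    (min dl dh - d).toNat < fuel →
    pvScan t d fuel = if dl ≤ dh then t - dl else t + dh := by
  intro fuel
  induction fuel with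
  | zero => intro t d dl dh _ h1 h2 _ _ _ _ hf; omega
  | succ fuel ih =>
    intro t d dl dh hd hdl hdh hl hh hnol hnoh hf
    by_cases hE : d = dl
    · subst hE
      rw [if_pos hdh]
      simp [pvScan, hl]
    · have hdl' : d < dl := lt_of_le_of_ne hdl hE
      have hLo : pvIsLucky (t - d) = false := hnol d le_rfl hdl'
      by_cases hE2 : d = dh
      · subst hE2
        rw [if_neg (show ¬ dl ≤ d by omega)]
        simp [pvScan, hLo, hh]
      · have hdh' : d < dh := lt_of_le_of_ne hdh hE2
        have hHi : pvIsLucky (t + d) = false := hnoh d le_rfl hdh'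
        have := ih t (d + 1) dl dh (by omega) (by omega) (by omega) hl hh
          (fun e he1 he2 => hnol e (by omega) he2)
          (fun e he1 he2 => hnoh e (by omega) he2) (by omega)
        simpa [pvScan, hLo, hHi] using this

-- ===== VERDICT (by name: the statement is the Claim_ definition above) =====
theorem get_nearest_lucky_ticket_spec : Claim_equal_get_nearest_lucky_ticket := by
  unfold Claim_equal_get_nearest_lucky_ticket
  intro t hDom hPre
  unfold Spec_get_nearest_lucky_ticket get_nearest_lucky_ticket get_nearest_lucky_ticket_alt
  have hDom' : -2147483648 ≤ t ∧ t ≤ 2147483648 := by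
    unfold Dom_get_nearest_lucky_ticket pvDomInt at hDom; exact of_decide_eq_true hDom
  have ht0 : 0 ≤ t := hPre
  by_cases hl : pvIsLucky t = true
  · simp [hl]
  · -- t is not lucky, hence t ≠ 0 (0 is lucky)
    have ht1 : 1 ≤ t := by
      by_contra hc
      have ht0' : t = 0 := by omega
      exact hl (by rw [ht0']; exact pvLucky_zero)
    have hup := pvSearchUp_spec pvFuel (t + 1) 10000000001 pvLucky_big (by omega)
      (by unfold pvFuel; omega)
    have hdown := pvSearchDown_spec pvFuel (t - 1) 0 pvLucky_zero (by omega)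
      (by unfold pvFuel; omega)
    set hi := pvSearchUp (t + 1) pvFuel with hhi
    set lo := pvSearchDown (t - 1) pvFuel with hlo
    have hscan := pvScan_spec pvFuel t 1 (t - lo) (hi - t)
      (le_refl 1) (by omega) (by omega)
      (by have := hdown.1; simpa [show t - (t - lo) = lo by ring] using this)
      (by have := hup.1; simpa [show t + (hi - t) = hi by ring] using this)
      (fun e he1 he2 => hdown.2.2.2 (t - e) (by omega) (by omega))
      (fun e he1 he2 => hup.2.2.2 (t + e) (by omega) (by omega))
      (by have h1 := hdown.2.2.1; have h2 := hup.2.2.1; unfold pvFuel; omega)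
    by_cases h100 : t = 100000
    · -- A's special case; B's scan still yields 100001: hi = 100001 and lo ≤ 99998
      subst h100
      have hhi' : hi = 100001 := by
        have hle : hi ≤ 100001 := by
          by_contra hgt
          have := hup.2.2.2 100001 (by omega) (by omega)
          rw [pvLucky_100001] at this; exact absurd this (by simp)
        have := hup.2.1; omega
      have hlo' : lo ≤ 99998 := by
        have hne : lo ≠ 99999 := by
          intro he; rw [he] at hdown
          rw [pvNotLucky_99999] at hdown; exact absurd hdown.1 (by simp)
        have := hdown.2.1; omega
      have hcm : ¬ ((100000 : Int) - lo ≤ hi - 100000) := by omega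
      rw [hscan, if_neg hcm]
      simp only [hl, if_false, Bool.false_eq_true]
      norm_num
      omega
    · have h100' : (t == (100000 : Int)) = false := by simp [h100]
      rw [hscan]
      simp only [hl, h100', Bool.false_eq_true, if_false]
      by_cases hcmp : t - lo ≤ hi - t
      · simp [hcmp, show t - (t - lo) = lo by ring]
      · simp [hcmp, show t + (hi - t) = hi by ring]
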